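-- pv_equiv track=rewrite | github.com/mikeizbicki/markdown-compiler | markdown_compiler/util/line_functions.py | compile_strikethrough
-- ===== SOURCE A (Python) =====
-- def compile_strikethrough(line):
--     '''
--     Convert "~~strikethrough~~" to "<ins>strikethrough</ins>".
--
--     HINT:
--     The strikethrough annotations are very similar to implement as the italic function.
--     The difference is that there are two delimiting characters instead of one.
--     This will require carefully thinking about the range of your for loop and all of your list indexing.
--
--     >>> compile_strikethrough('~~This is strikethrough!~~ This is not strikethrough.')
--     '<ins>This is strikethrough!</ins> This is not strikethrough.'
--     >>> compile_strikethrough('~~This is strikethrough!~~')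
--     '<ins>This is strikethrough!</ins>'
--     >>> compile_strikethrough('This is ~~strikethrough~~!')
--     'This is <ins>strikethrough</ins>!'
--     >>> compile_strikethrough('This is not ~~strikethrough!')
--     'This is not ~~strikethrough!'
--     >>> compile_strikethrough('~~')
--     '~~'
--     '''
--     result = ''
--     i = 0
--     while i < len(line):
--         # Check if we have opening ~~
--         if i < len(line) - 1 and line[i] == '~' and line[i+1] == '~':
--             # Look for closing ~~
--             closing = -1
--             for j in range(i + 2, len(line) - 1):
--                 if line[j] == '~' and line[j+1] == '~':
--                     closing = j
--                     break
--             if closing != -1: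
--                 # Found matching pair
--                 result += '<ins>' + line[i+2:closing] + '</ins>'
--                 i = closing + 2
--             else:
--                 # No closing found, keep original
--                 result += line[i]
--                 i += 1
--         else:
--             result += line[i]
--             i += 1
--     return result
-- ===== SOURCE B (Python) =====
-- def compile_strikethrough(line):
--     parts = []
--     rest = line
--     while True:
--         op = rest.find('~~')
--         if op == -1:
--             parts.append(rest)
--             return ''.join(parts)
--         cl = rest.find('~~', op + 2)
--         if cl == -1:
--             parts.append(rest[:op + 1])
--             rest = rest[op + 1:]
--         else:
--             parts.append(rest[:op])
--             parts.append('<ins>')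
--             parts.append(rest[op + 2:cl])
--             parts.append('</ins>')
--             rest = rest[cl + 2:]
-- ===== Notes on version B (the rewrite author's own statement) =====
-- stated objective: faster
-- what changed: Replaces A's character-by-character while-loop with result += by a chunked scan that uses str.find to jump straight to each tilde-pair delimiter, appends whole slices to a list and joins once at the end.
import Mathlib
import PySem

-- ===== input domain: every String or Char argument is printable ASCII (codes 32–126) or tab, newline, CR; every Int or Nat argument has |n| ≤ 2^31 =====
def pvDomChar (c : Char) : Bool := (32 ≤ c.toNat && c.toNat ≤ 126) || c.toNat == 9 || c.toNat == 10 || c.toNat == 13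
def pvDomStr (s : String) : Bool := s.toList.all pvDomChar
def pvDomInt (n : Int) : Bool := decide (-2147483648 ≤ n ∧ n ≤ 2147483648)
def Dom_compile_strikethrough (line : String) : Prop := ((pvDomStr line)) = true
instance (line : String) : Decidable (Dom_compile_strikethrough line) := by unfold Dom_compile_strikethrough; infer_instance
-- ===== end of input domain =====

-- B rewrites A's char-by-char scan as a chunked scan with str.find and join (objective: faster, constant-factor).

-- ===== PORT A =====
-- A's index-based while loop becomes recursion on the remaining suffix of the line;
-- aFindClose is A's inner `for j` search, index relative to the suffix after the opening delimiter.
def aFindClose : List Char → Option Nat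
  | c1 :: c2 :: rest =>
    if c1 = '~' ∧ c2 = '~' then some 0
    else
      match aFindClose (c2 :: rest) with
      | some k => some (k + 1)
      | none => none
  | _ => none

def aLoop : List Char → List Char
  | c1 :: c2 :: rest =>
    if c1 = '~' ∧ c2 = '~' then
      match aFindClose rest with
      | some k =>
          ['<', 'i', 'n', 's', '>'] ++ rest.take k ++ ['<', '/', 'i', 'n', 's', '>'] ++
            aLoop (rest.drop (k + 2))
      | none => c1 :: aLoop (c2 :: rest)
    else c1 :: aLoop (c2 :: rest)
  | [c] => [c]
  | [] => []
termination_by cs => cs.length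
decreasing_by all_goals (simp [List.length_drop]; try omega)

def compile_strikethrough (line : String) : String := String.ofList (aLoop line.toList)

-- ===== PORT B =====
-- two bounds lemmas cited by bLoop's decreasing_by
theorem find_tt_bounds (s : List Char) (hop : PySem.Chars.find s ['~', '~'] ≠ -1) :
    0 ≤ PySem.Chars.find s ['~', '~'] ∧ (PySem.Chars.find s ['~', '~']).toNat + 2 ≤ s.length := by
  have h0 : 0 ≤ PySem.Chars.find s ['~', '~'] := by
    have := PySem.Chars.neg_one_le_find s ['~', '~']; omega
  have hpre := (PySem.Chars.find_spec h0).1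
  have hlen := hpre.length_le
  simp [List.length_drop] at hlen
  exact ⟨h0, by omega⟩

theorem findFrom_tt_bounds (s : List Char) (hop : PySem.Chars.find s ['~', '~'] ≠ -1)
    (hcl : PySem.Chars.findFrom s ['~', '~'] (PySem.Chars.find s ['~', '~'] + 2) ≠ -1) :
    0 ≤ PySem.Chars.findFrom s ['~', '~'] (PySem.Chars.find s ['~', '~'] + 2) ∧
      (PySem.Chars.findFrom s ['~', '~'] (PySem.Chars.find s ['~', '~'] + 2)).toNat + 2 ≤ s.length := by
  obtain ⟨h0, h2⟩ := find_tt_bounds s hop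
  have hcast : PySem.Chars.find s ['~', '~'] + 2 = (((PySem.Chars.find s ['~', '~']).toNat + 2 : Nat) : Int) := by omega
  rw [hcast] at hcl ⊢
  rw [PySem.Chars.findFrom_natCast s ['~', '~'] _ (by omega)] at hcl ⊢
  by_cases hg : PySem.Chars.find (List.drop ((PySem.Chars.find s ['~', '~']).toNat + 2) s) ['~', '~'] = -1
  · rw [if_pos hg] at hcl; exact absurd rfl hcl
  · rw [if_neg hg] at hcl ⊢
    have hg0 : 0 ≤ PySem.Chars.find (List.drop ((PySem.Chars.find s ['~', '~']).toNat + 2) s) ['~', '~'] := by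
      have := PySem.Chars.neg_one_le_find (List.drop ((PySem.Chars.find s ['~', '~']).toNat + 2) s) ['~', '~']
      omega
    have hlen := ((PySem.Chars.find_spec hg0).1).length_le
    simp [List.length_drop] at hlen
    constructor
    · omega
    · omega

def bLoop (rest : List Char) : List Char :=
  let op := PySem.Chars.find rest ['~', '~']
  if hop : op = -1 then rest
  else
    let cl := PySem.Chars.findFrom rest ['~', '~'] (op + 2)
    if hcl : cl = -1 then
      PySem.List.slice rest none (some (op + 1)) ++ bLoop (PySem.List.slice rest (some (op + 1)) none)
    else
      PySem.List.slice rest none (some op) ++ ['<', 'i', 'n', 's', '>'] ++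
        PySem.List.slice rest (some (op + 2)) (some cl) ++ ['<', '/', 'i', 'n', 's', '>'] ++
        bLoop (PySem.List.slice rest (some (cl + 2)) none)
termination_by rest.length
decreasing_by
  · obtain ⟨h0, h2⟩ := find_tt_bounds rest hop
    rw [PySem.List.slice_from _ (by omega : (0:Int) ≤ PySem.Chars.find rest ['~', '~'] + 1)]
    simp [List.length_drop]; omega
  · obtain ⟨h0, h2⟩ := findFrom_tt_bounds rest hop hcl
    rw [PySem.List.slice_from _ (by omega : (0:Int) ≤ PySem.Chars.findFrom rest ['~', '~'] (PySem.Chars.find rest ['~', '~'] + 2) + 2)]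
    simp [List.length_drop]; omega

def compile_strikethrough_alt (line : String) : String := String.ofList (bLoop line.toList)

-- ===== PRECONDITION & SPEC =====
def Spec_compile_strikethrough (line : String) (out : String) : Prop := out = compile_strikethrough_alt line
instance (line : String) (out : String) : Decidable (Spec_compile_strikethrough line out) := by unfold Spec_compile_strikethrough; infer_instance

-- ===== CLAIM (what is proved, stated in full; the proofs are below) =====
def Claim_equal_compile_strikethrough : Prop := ∀ (line : String), Dom_compile_strikethrough line → Spec_compile_strikethrough line (compile_strikethrough line)

-- ===== LEMMAS AND PROOFS =====
theorem aFindClose_eq_none {cs : List Char} (h : aFindClose cs = none) :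
    ∀ j, ¬ (['~', '~'] <+: cs.drop j) := by
  induction cs with
  | nil =>
    intro j hp
    have := hp.length_le
    simp at this
  | cons c tail ih =>
    cases tail with
    | nil =>
      intro j hp
      have := hp.length_le
      simp [List.length_drop] at this
      omega
    | cons c2 rest =>
      by_cases hc : c = '~' ∧ c2 = '~'
      · simp only [aFindClose, if_pos hc] at h; simp at h
      · simp only [aFindClose, if_neg hc] at h
        cases hrec : aFindClose (c2 :: rest) with
        | some k' => rw [hrec] at h; simp at h
        | none =>
          intro j hp
          cases j with
          | zero =>
            simp only [List.drop_zero, List.cons_prefix_cons] at hp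
            exact hc ⟨hp.1.symm, hp.2.1.symm⟩
          | succ j =>
            rw [List.drop_succ_cons] at hp
            exact ih hrec j hp

theorem aFindClose_eq_some {cs : List Char} {k : Nat} (h : aFindClose cs = some k) :
    ['~', '~'] <+: cs.drop k ∧ ∀ i < k, ¬ (['~', '~'] <+: cs.drop i) := by
  induction cs generalizing k with
  | nil => simp [aFindClose] at h
  | cons c tail ih =>
    cases tail with
    | nil => simp [aFindClose] at h
    | cons c2 rest =>
      by_cases hc : c = '~' ∧ c2 = '~'
      · simp only [aFindClose, if_pos hc] at h
        obtain rfl : k = 0 := by simpa using h.symm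
        refine ⟨?_, by omega⟩
        simp [List.cons_prefix_cons, hc.1, hc.2]
      · simp only [aFindClose, if_neg hc] at h
        cases hrec : aFindClose (c2 :: rest) with
        | none => rw [hrec] at h; simp at h
        | some k' =>
          rw [hrec] at h
          obtain rfl : k = k' + 1 := by simpa using h.symm
          obtain ⟨hp, hmin⟩ := ih hrec
          refine ⟨by simpa [List.drop_succ_cons] using hp, ?_⟩
          intro i hi hp'
          cases i with
          | zero =>
            simp only [List.drop_zero, List.cons_prefix_cons] at hp'
            exact hc ⟨hp'.1.symm, hp'.2.1.symm⟩
          | succ i =>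
            rw [List.drop_succ_cons] at hp'
            exact hmin i (by omega) hp'

theorem find_eq_aFindClose (cs : List Char) :
    PySem.Chars.find cs ['~', '~'] =
      (match aFindClose cs with | none => -1 | some k => (k : Int)) := by
  cases hA : aFindClose cs with
  | none =>
    refine (PySem.Chars.find_eq_neg_one_iff cs ['~', '~']).mpr ?_
    intro hinf
    obtain ⟨j, hp⟩ := (PySem.Chars.exists_prefix_drop_iff_isIn ['~', '~'] cs).mpr
      ((PySem.Chars.isIn_iff_infix ['~', '~'] cs).mpr hinf)
    exact aFindClose_eq_none hA j hp
  | some k =>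
    obtain ⟨hp, hmin⟩ := aFindClose_eq_some hA
    have hinf : ['~', '~'] <:+: cs := (PySem.Chars.isIn_iff_infix ['~', '~'] cs).mp
      ((PySem.Chars.exists_prefix_drop_iff_isIn ['~', '~'] cs).mp ⟨k, hp⟩)
    have h0 : 0 ≤ PySem.Chars.find cs ['~', '~'] := (PySem.Chars.find_nonneg_iff cs ['~', '~']).mpr hinf
    obtain ⟨hp', hmin'⟩ := PySem.Chars.find_spec h0
    have hEq : (PySem.Chars.find cs ['~', '~']).toNat = k := by
      rcases lt_trichotomy (PySem.Chars.find cs ['~', '~']).toNat k with hlt | heq | hgt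
      · exact absurd hp' (hmin _ hlt)
      · exact heq
      · exact absurd hp (hmin' k hgt)
    simp only []
    omega

theorem aLoop_no_tt {cs : List Char} (h : aFindClose cs = none) : aLoop cs = cs := by
  induction cs with
  | nil => simp [aLoop]
  | cons c tail ih =>
    cases tail with
    | nil => simp [aLoop]
    | cons c2 rest =>
      by_cases hc : c = '~' ∧ c2 = '~'
      · simp only [aFindClose, if_pos hc] at h; simp at h
      · simp only [aFindClose, if_neg hc] at h
        have hrec : aFindClose (c2 :: rest) = none := by
          cases hrec : aFindClose (c2 :: rest) with
          | none => rfl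
          | some k' => rw [hrec] at h; simp at h
        rw [aLoop, if_neg hc, ih hrec]

theorem aLoop_skip {cs : List Char} {k : Nat} (h : aFindClose cs = some k) :
    aLoop cs = cs.take k ++ aLoop (cs.drop k) := by
  induction cs generalizing k with
  | nil => simp [aFindClose] at h
  | cons c tail ih =>
    cases tail with
    | nil => simp [aFindClose] at h
    | cons c2 rest =>
      by_cases hc : c = '~' ∧ c2 = '~'
      · simp only [aFindClose, if_pos hc] at h
        obtain rfl : k = 0 := by simpa using h.symm
        simp
      · simp only [aFindClose, if_neg hc] at h
        cases hrec : aFindClose (c2 :: rest) with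
        | none => rw [hrec] at h; simp at h
        | some k' =>
          rw [hrec] at h
          obtain rfl : k = k' + 1 := by simpa using h.symm
          rw [aLoop, if_neg hc, ih hrec]
          simp [List.take_succ_cons, List.drop_succ_cons]

theorem aLoop_eq_bLoop (n : Nat) : ∀ cs : List Char, cs.length ≤ n → aLoop cs = bLoop cs := by
  induction n with
  | zero =>
    intro cs hlen
    obtain rfl : cs = [] := List.eq_nil_of_length_eq_zero (by omega)
    rw [bLoop]
    simp [aLoop, find_eq_aFindClose, aFindClose]
  | succ n ih =>
    intro cs hlen
    cases hA : aFindClose cs with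
    | none =>
      rw [aLoop_no_tt hA, bLoop]
      have hfind : PySem.Chars.find cs ['~', '~'] = -1 := by rw [find_eq_aFindClose, hA]
      simp [hfind]
    | some k =>
      have hfind : PySem.Chars.find cs ['~', '~'] = (k : Int) := by rw [find_eq_aFindClose, hA]
      obtain ⟨hp, _⟩ := aFindClose_eq_some hA
      obtain ⟨t, ht⟩ := hp
      have hdk : cs.drop k = '~' :: '~' :: t := ht.symm
      have hlen2 : cs.length - k = 2 + t.length := by
        have := congrArg List.length hdk
        simp [List.length_drop] at this
        omega
      have hkle : k + 2 ≤ cs.length := by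
        have h0 : (0 : Int) ≤ PySem.Chars.find cs ['~', '~'] := by rw [hfind]; omega
        have := ((PySem.Chars.find_spec h0).1).length_le
        simp [List.length_drop, hfind] at this
        omega
      have hdk2 : cs.drop (k + 2) = t := by
        rw [← List.drop_drop, hdk]
        rfl
      rw [aLoop_skip hA, hdk, bLoop]
      simp only [hfind]
      rw [dif_neg (by omega : ¬((k : Int) = -1))]
      have hcast : (k : Int) + 2 = ((k + 2 : Nat) : Int) := by push_cast; ring
      rw [hcast, PySem.Chars.findFrom_natCast cs ['~', '~'] (k + 2) hkle, hdk2]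
      cases hA2 : aFindClose t with
      | none =>
        have hf2 : PySem.Chars.find t ['~', '~'] = -1 := by rw [find_eq_aFindClose, hA2]
        rw [hf2, if_pos rfl, dif_pos rfl]
        have hstep : aLoop ('~' :: '~' :: t) = '~' :: aLoop ('~' :: t) := by
          rw [aLoop, if_pos ⟨rfl, rfl⟩, hA2]
        rw [hstep]
        have hc1 : ((k : Int) + 1) = ((k + 1 : Nat) : Int) := by push_cast; ring
        rw [hc1, PySem.List.slice_to_natCast, PySem.List.slice_from_natCast]
        have hdk1 : cs.drop (k + 1) = '~' :: t := by
          rw [← List.drop_drop, hdk]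
          rfl
        have htk1 : cs.take (k + 1) = cs.take k ++ ['~'] := by
          have hgk : cs[k]? = some '~' := by
            have := congrArg (fun l => l[0]?) hdk
            simpa using this
          rw [List.take_add_one, hgk]
          rfl
        rw [hdk1, htk1, ← ih ('~' :: t) (by simp; omega)]
        simp
      | some m =>
        have hf2 : PySem.Chars.find t ['~', '~'] = (m : Int) := by rw [find_eq_aFindClose, hA2]
        rw [hf2, if_neg (by omega : ¬((m : Int) = -1)), dif_neg (by omega : ¬(((k + 2 : Nat) : Int) + (m : Int) = -1))]
        have hstep : aLoop ('~' :: '~' :: t) =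
            ['<', 'i', 'n', 's', '>'] ++ t.take m ++ ['<', '/', 'i', 'n', 's', '>'] ++
              aLoop (t.drop (m + 2)) := by
          rw [aLoop, if_pos ⟨rfl, rfl⟩, hA2]
        rw [hstep]
        have hc2 : ((k + 2 : Nat) : Int) + (m : Int) = ((k + 2 + m : Nat) : Int) := by push_cast; ring
        rw [hc2, PySem.List.slice_to_natCast, PySem.List.slice_natCast]
        have hc3 : ((k + 2 + m : Nat) : Int) + 2 = ((k + 2 + m + 2 : Nat) : Int) := by push_cast; ring
        rw [hc3, PySem.List.slice_from_natCast]
        have hdk3 : cs.drop (k + 2 + m + 2) = t.drop (m + 2) := by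
          rw [← hdk2, List.drop_drop]
          congr 1
        have hdkt : List.take (k + 2 + m - (k + 2)) (List.drop (k + 2) cs) = t.take m := by
          rw [hdk2]
          congr 1
          omega
        rw [hdk3, hdkt, ← ih (t.drop (m + 2)) (by simp [List.length_drop]; omega)]
        simp

-- ===== VERDICT (by name: the statement is the Claim_ definition above) =====
theorem compile_strikethrough_spec : Claim_equal_compile_strikethrough := by
  intro line _
  unfold Spec_compile_strikethrough compile_strikethrough compile_strikethrough_alt
  rw [aLoop_eq_bLoop line.toList.length line.toList le_rfl]
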